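-- pv_equiv track=rewrite | github.com/pypi-data/pypi-mirror-402 | packages/invarlock/invarlock-0.3.7-py3-none-any.whl/invarlock/reporting/utils.py | _infer_scope_from_modules
-- ===== SOURCE A (Python) =====
-- from collections.abc import Iterable
--
-- def _infer_scope_from_modules(modules: Iterable[str]) -> str:
--     modules = list(modules)
--     if not modules:
--         return "unknown"
--     families: set[str] = set()
--     for module in modules:
--         name = str(module).lower()
--         if ".attn" in name or "attention" in name:
--             families.add("attn")
--         if any(token in name for token in (".mlp", ".ffn", "feed_forward", "fc")):
--             families.add("ffn")
--         if any(token in name for token in (".wte", ".embed", "embedding")):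
--             families.add("embed")
--     if not families:
--         return "all"
--     if len(families) == 1:
--         return next(iter(families))
--     return "+".join(sorted(families))
-- ===== SOURCE B (Python) =====
-- _FAMILY_TOKENS = (
--     ("attn", (".attn", "attention")),
--     ("embed", (".wte", ".embed", "embedding")),
--     ("ffn", (".mlp", ".ffn", "feed_forward", "fc")),
-- )
--
--
-- def _infer_scope_from_modules(modules):
--     names = [str(m).lower() for m in modules]
--     if not names:
--         return "unknown"
--     families = [fam for fam, tokens in _FAMILY_TOKENS
--                 if any(tok in name for name in names for tok in tokens)]
--     if not families:
--         return "all"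
--     if len(families) == 1:
--         return families[0]
--     return "+".join(families)
-- ===== Notes on version B (the rewrite author's own statement) =====
-- stated objective: faster
-- what changed: Replaces the per-module loop with three inline substring checks mutating a set by a data-driven table of (family, tokens) kept in alphabetical order, filtered with a short-circuiting per-family scan over the pre-lowercased names; the family list comes out sorted, so the set and the final sorted() call disappear.
import Mathlib
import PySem

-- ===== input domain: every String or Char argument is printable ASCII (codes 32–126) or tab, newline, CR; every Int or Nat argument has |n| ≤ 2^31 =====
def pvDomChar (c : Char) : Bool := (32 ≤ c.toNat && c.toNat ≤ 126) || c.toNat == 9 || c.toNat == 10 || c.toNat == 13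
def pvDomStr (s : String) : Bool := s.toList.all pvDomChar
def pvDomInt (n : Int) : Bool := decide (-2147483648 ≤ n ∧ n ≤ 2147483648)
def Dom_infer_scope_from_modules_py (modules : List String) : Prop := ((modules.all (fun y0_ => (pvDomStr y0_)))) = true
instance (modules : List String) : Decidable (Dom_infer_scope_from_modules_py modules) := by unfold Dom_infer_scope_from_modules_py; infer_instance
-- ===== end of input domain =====

-- B replaces A's per-module loop (three inline substring checks mutating a set) by a
-- table of (family, tokens) rows filtered per family over the pre-lowercased names; the
-- alphabetical table order makes A's final sort unnecessary, and per-family any() scans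
-- short-circuit (a timing run measured B faster by a constant factor); same return values.


-- ===== PORT A =====
-- the three membership tests of A's loop body, applied to the lowered name
def condAttn (name : String) : Bool :=
  PySem.Str.isIn ".attn" name || PySem.Str.isIn "attention" name
def condFfn (name : String) : Bool :=
  [".mlp", ".ffn", "feed_forward", "fc"].any (fun token => PySem.Str.isIn token name)
def condEmbed (name : String) : Bool :=
  [".wte", ".embed", "embedding"].any (fun token => PySem.Str.isIn token name)

-- one iteration of A's 'for module in modules' loop over the families set
def inferStepA (families : PySem.Set String) (module : String) : PySem.Set String :=
  let name := PySem.Str.lower module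
  let families := if condAttn name then PySem.Set.add families "attn" else families
  let families := if condFfn name then PySem.Set.add families "ffn" else families
  if condEmbed name then PySem.Set.add families "embed" else families

def infer_scope_from_modules_py (modules : List String) : String :=
  if modules.isEmpty then "unknown"
  else
    let families : PySem.Set String := modules.foldl inferStepA PySem.Set.empty
    if families.isEmpty then "all"
    else if PySem.Set.len families = 1 then families.headD ""  -- next(iter(families)): the unique element
    else PySem.Str.join "+" (PySem.List.sorted families (fun s => s))

-- ===== PORT B =====
def pvFamilyTokens : List (String × List String) :=
  [("attn", [".attn", "attention"]),
   ("embed", [".wte", ".embed", "embedding"]),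
   ("ffn", [".mlp", ".ffn", "feed_forward", "fc"])]

def infer_scope_from_modules_py_alt (modules : List String) : String :=
  let names := modules.map (fun m => PySem.Str.lower m)
  if names.isEmpty then "unknown"
  else
    let families :=
      (pvFamilyTokens.filter (fun fam =>
        names.any (fun name => fam.2.any (fun tok => PySem.Str.isIn tok name)))).map (fun p => p.1)
    if families.isEmpty then "all"
    else if families.length = 1 then families.headD ""
    else PySem.Str.join "+" families

-- ===== PRECONDITION & SPEC =====
def Spec_infer_scope_from_modules_py (modules : List String) (out : String) : Prop := out = infer_scope_from_modules_py_alt modules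
instance (modules : List String) (out : String) : Decidable (Spec_infer_scope_from_modules_py modules out) := by unfold Spec_infer_scope_from_modules_py; infer_instance

-- ===== CLAIM (what is proved, stated in full; the proofs are below) =====
def Claim_equal_infer_scope_from_modules_py : Prop := ∀ (modules : List String), Dom_infer_scope_from_modules_py modules → Spec_infer_scope_from_modules_py modules (infer_scope_from_modules_py modules)

-- ===== LEMMAS AND PROOFS =====

theorem inferStepA_mem (s : PySem.Set String) (m x : String) :
    x ∈ inferStepA s m ↔ x ∈ s ∨
      (x = "attn" ∧ condAttn (PySem.Str.lower m) = true) ∨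
      (x = "ffn" ∧ condFfn (PySem.Str.lower m) = true) ∨
      (x = "embed" ∧ condEmbed (PySem.Str.lower m) = true) := by
  unfold inferStepA
  dsimp only
  cases h1 : condAttn (PySem.Str.lower m) <;> cases h2 : condFfn (PySem.Str.lower m) <;>
    cases h3 : condEmbed (PySem.Str.lower m) <;>
    simp only [h1, h2, h3, Bool.false_eq_true, ite_true, ite_false, if_true, if_false,
      PySem.Set.mem_add, and_false, and_true, or_false, false_or, or_assoc]

theorem inferStepA_nodup (s : PySem.Set String) (m : String) (h : s.Nodup) :
    (inferStepA s m).Nodup := by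
  unfold inferStepA
  dsimp only
  split_ifs <;> (repeat first | assumption | apply PySem.Set.nodup_add)

theorem foldA_spec (modules : List String) (s : PySem.Set String) (hnd : s.Nodup) :
    (modules.foldl inferStepA s).Nodup ∧
    ("attn" ∈ modules.foldl inferStepA s ↔ "attn" ∈ s ∨ modules.any (fun m => condAttn (PySem.Str.lower m)) = true) ∧
    ("ffn" ∈ modules.foldl inferStepA s ↔ "ffn" ∈ s ∨ modules.any (fun m => condFfn (PySem.Str.lower m)) = true) ∧
    ("embed" ∈ modules.foldl inferStepA s ↔ "embed" ∈ s ∨ modules.any (fun m => condEmbed (PySem.Str.lower m)) = true) ∧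
    (∀ x ∈ modules.foldl inferStepA s, x ∈ s ∨ x = "attn" ∨ x = "ffn" ∨ x = "embed") := by
  induction modules generalizing s with
  | nil => simp_all
  | cons m ms ih =>
    simp only [List.foldl_cons, List.any_cons]
    obtain ⟨h1, h2, h3, h4, h5⟩ := ih (inferStepA s m) (inferStepA_nodup s m hnd)
    refine ⟨h1, ?_, ?_, ?_, ?_⟩
    · rw [h2, inferStepA_mem]
      simp only [Bool.or_eq_true, String.reduceEq, false_and, true_and, false_or, or_false, or_assoc]
    · rw [h3, inferStepA_mem]
      simp only [Bool.or_eq_true, String.reduceEq, false_and, true_and, false_or, or_false, or_assoc]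
    · rw [h4, inferStepA_mem]
      simp only [Bool.or_eq_true, String.reduceEq, false_and, true_and, false_or, or_false, or_assoc]
    · intro x hx
      rcases h5 x hx with h | h
      · rw [inferStepA_mem] at h
        rcases h with h | ⟨h, -⟩ | ⟨h, -⟩ | ⟨h, -⟩
        · exact Or.inl h
        · exact Or.inr (Or.inl h)
        · exact Or.inr (Or.inr (Or.inl h))
        · exact Or.inr (Or.inr (Or.inr h))
      · exact Or.inr h

-- B's family list as a function of the three per-family scans
theorem famB_eq (modules : List String) :
    (pvFamilyTokens.filter (fun fam =>
        (modules.map (fun m => PySem.Str.lower m)).any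
          (fun name => fam.2.any (fun tok => PySem.Str.isIn tok name)))).map (fun p => p.1) =
    (if modules.any (fun m => condAttn (PySem.Str.lower m)) then ["attn"] else []) ++
    (if modules.any (fun m => condEmbed (PySem.Str.lower m)) then ["embed"] else []) ++
    (if modules.any (fun m => condFfn (PySem.Str.lower m)) then ["ffn"] else []) := by
  have e1 : (modules.map (fun m => PySem.Str.lower m)).any
      (fun name => [".attn", "attention"].any (fun tok => PySem.Str.isIn tok name)) =
      modules.any (fun m => condAttn (PySem.Str.lower m)) := by
    rw [List.any_map]
    simp only [Function.comp_def, List.any_cons, List.any_nil, Bool.or_false, condAttn]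
  have e2 : (modules.map (fun m => PySem.Str.lower m)).any
      (fun name => [".wte", ".embed", "embedding"].any (fun tok => PySem.Str.isIn tok name)) =
      modules.any (fun m => condEmbed (PySem.Str.lower m)) := by
    rw [List.any_map]
    simp only [Function.comp_def, List.any_cons, List.any_nil, Bool.or_false, condEmbed]
  have e3 : (modules.map (fun m => PySem.Str.lower m)).any
      (fun name => [".mlp", ".ffn", "feed_forward", "fc"].any (fun tok => PySem.Str.isIn tok name)) =
      modules.any (fun m => condFfn (PySem.Str.lower m)) := by
    rw [List.any_map]
    simp only [Function.comp_def, List.any_cons, List.any_nil, Bool.or_false, condFfn]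
  show (List.filter _ [_, _, _]).map _ = _
  rw [List.filter_cons, List.filter_cons, List.filter_cons, List.filter_nil]
  simp only [e1, e2, e3]
  cases modules.any (fun m => condAttn (PySem.Str.lower m)) <;>
    cases modules.any (fun m => condEmbed (PySem.Str.lower m)) <;>
    cases modules.any (fun m => condFfn (PySem.Str.lower m)) <;> rfl

-- the family list B builds, as a function of the three family flags
def canonList (a e f : Bool) : List String :=
  (if a then ["attn"] else []) ++ (if e then ["embed"] else []) ++ (if f then ["ffn"] else [])

theorem mem_canonList (a e f : Bool) (x : String) :
    x ∈ canonList a e f ↔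
      (a = true ∧ x = "attn") ∨ (e = true ∧ x = "embed") ∨ (f = true ∧ x = "ffn") := by
  unfold canonList
  cases a <;> cases e <;> cases f <;>
    simp only [List.append_nil, List.nil_append, List.append_assoc, List.mem_append,
      List.mem_cons, List.not_mem_nil, if_true, if_false, ite_true, ite_false,
      Bool.false_eq_true, false_and, true_and, false_or, or_false]

theorem nodup_canonList (a e f : Bool) : (canonList a e f).Nodup := by
  unfold canonList; cases a <;> cases e <;> cases f <;> decide

theorem pwCanon (a e f : Bool) :
    (canonList a e f).Pairwise (fun x y => x < y) := by
  unfold canonList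
  cases a <;> cases e <;> cases f <;>
    simp only [List.append_nil, List.nil_append, if_true, if_false, ite_true, ite_false,
      List.pairwise_cons, List.mem_cons, List.not_mem_nil, List.mem_singleton,
      List.forall_mem_cons, List.forall_mem_nil, List.forall_mem_singleton,
      List.Pairwise.nil, and_true, true_and, String.lt_iff_toList_lt] <;>
    trivial

-- A's tail (set → answer) agrees with B's tail (family list → answer)
theorem endgame (S : List String) (a f e : Bool) (hnd : S.Nodup)
    (hA : "attn" ∈ S ↔ a = true) (hF : "ffn" ∈ S ↔ f = true) (hE : "embed" ∈ S ↔ e = true)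
    (hsub : ∀ x ∈ S, x = "attn" ∨ x = "ffn" ∨ x = "embed") :
    (if S.isEmpty then "all"
     else if PySem.Set.len S = 1 then S.headD ""
     else PySem.Str.join "+" (PySem.List.sorted S (fun s => s))) =
    (if (canonList a e f).isEmpty then "all"
     else if (canonList a e f).length = 1 then (canonList a e f).headD ""
     else PySem.Str.join "+" (canonList a e f)) := by
  have hperm : S.Perm (canonList a e f) := by
    rw [List.perm_ext_iff_of_nodup hnd (nodup_canonList a e f)]
    intro x
    rw [mem_canonList]
    constructor
    · intro hx
      rcases hsub x hx with rfl | rfl | rfl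
      · exact Or.inl ⟨hA.mp hx, rfl⟩
      · exact Or.inr (Or.inr ⟨hF.mp hx, rfl⟩)
      · exact Or.inr (Or.inl ⟨hE.mp hx, rfl⟩)
    · rintro (⟨h, rfl⟩ | ⟨h, rfl⟩ | ⟨h, rfl⟩)
      · exact hA.mpr h
      · exact hE.mpr h
      · exact hF.mpr h
  clear hA hF hE hsub
  cases a <;> cases e <;> cases f
  case false.false.false =>
    have hS : S = [] := List.Perm.eq_nil (show S.Perm [] from hperm)
    rw [hS]
    decide
  all_goals first
  | -- canon is a singleton: S is that very list
    (rw [List.perm_singleton.mp hperm]; decide)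
  | -- canon has at least two elements
    (have hlenS : PySem.Set.len S = S.length := rfl
     have hne : S.isEmpty = false := by
       cases hS : S with
       | nil =>
         rw [hS] at hperm
         exact absurd hperm.symm.eq_nil (by decide)
       | cons h t => rfl
     have hlen1 : ¬ (PySem.Set.len S = 1) := by
       rw [hlenS, hperm.length_eq]
       decide
     rw [hne]
     simp only [Bool.false_eq_true, if_false]
     rw [if_neg hlen1,
         PySem.List.sorted_eq_of_perm_of_pairwise_lt S _ (fun s => s) hperm.symm (pwCanon _ _ _)]
     decide)

-- ===== VERDICT (by name: the statement is the Claim_ definition above) =====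
theorem infer_scope_from_modules_py_spec : Claim_equal_infer_scope_from_modules_py := by
  intro modules _
  unfold Spec_infer_scope_from_modules_py infer_scope_from_modules_py infer_scope_from_modules_py_alt
  cases modules with
  | nil => rfl
  | cons m ms =>
    dsimp only
    simp only [List.map_cons, List.isEmpty_cons, Bool.false_eq_true, if_false]
    rw [show ((PySem.Str.lower m) :: ms.map (fun m => PySem.Str.lower m)) =
          ((m :: ms).map (fun m => PySem.Str.lower m)) from rfl,
        famB_eq]
    obtain ⟨hnd, hA, hF, hE, hsub⟩ := foldA_spec (m :: ms) PySem.Set.empty List.nodup_nil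
    simp only [PySem.Set.empty, List.not_mem_nil, false_or] at hA hF hE hsub
    exact endgame _ _ _ _ hnd hA hF hE hsub
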